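-- pv_equiv track=rewrite | github.com/AMIVAYUN/codeTestPrac | BaekJoon/1644.py | calc
-- ===== SOURCE A (Python) =====
-- def isPrime( n ):
--     if( n == 2 or n == 3 ):
--         return True;
--     for i in range( 2, int( n ** 0.5 ) + 1 ):
--         if( n % i == 0 ):
--             return False;
--
--     return True;
--
-- def calc( n ):
--
--     lst = [];
--     if( 1 < n < 4 ):
--         return 1;
--
--     elif( n <= 1 ):
--         return 0;
--
--     for i in range( 2, n + 1 ):
--         if( isPrime( i ) ):
--             lst.append( i )
--
--     leng = len( lst );
--
--     prefix_sum = [ 0 ] * leng;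
--     prefix_sum[ 0 ] = lst[ 0 ];
--     answer = 0;
--
--
--
--     for idx in range( 1, leng ):
--         prefix_sum[ idx ] = prefix_sum[ idx - 1 ] + lst[ idx ];
--         if( prefix_sum[ idx ] == n ):
--             answer += 1;
--
--     for idx in range( leng ):
--         # N ^ 2 을 N LOG N 으로
--         lt = idx; rt = leng - 1;
--
--         while lt <= rt:
--             mid = ( lt + rt ) // 2;
--
--             if( prefix_sum[ mid ] - prefix_sum[ idx ] == n):
--                 answer += 1;
--                 break;
--
--             if( prefix_sum[ mid ] - prefix_sum[ idx ] < n ):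
--                 lt = mid + 1;
--
--             else:
--                 rt = mid - 1;
--
--
--     return answer;
-- ===== SOURCE B (Python) =====
-- def calc(n):
--     if n <= 1:
--         return 0
--     # Sieve of Eratosthenes (composites kept in a set)
--     comps = set()
--     for i in range(2, n + 1):
--         if i not in comps:
--             for j in range(i * i, n + 1, i):
--                 comps.add(j)
--     # prefix sums of the primes, with a leading 0
--     prefix = [0]
--     s = 0
--     for i in range(2, n + 1):
--         if i not in comps:
--             s += i
--             prefix.append(s)
--     ps = set(prefix)
--     return sum(1 for p in prefix if p + n in ps)
-- ===== Notes on version B (the rewrite author's own statement) =====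
-- stated objective: faster
-- what changed: Replaces per-number trial-division primality plus a per-start binary search over prefix sums with a Sieve of Eratosthenes and a single hash-set membership pass over the prefix sums (with a leading 0).
import Mathlib
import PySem

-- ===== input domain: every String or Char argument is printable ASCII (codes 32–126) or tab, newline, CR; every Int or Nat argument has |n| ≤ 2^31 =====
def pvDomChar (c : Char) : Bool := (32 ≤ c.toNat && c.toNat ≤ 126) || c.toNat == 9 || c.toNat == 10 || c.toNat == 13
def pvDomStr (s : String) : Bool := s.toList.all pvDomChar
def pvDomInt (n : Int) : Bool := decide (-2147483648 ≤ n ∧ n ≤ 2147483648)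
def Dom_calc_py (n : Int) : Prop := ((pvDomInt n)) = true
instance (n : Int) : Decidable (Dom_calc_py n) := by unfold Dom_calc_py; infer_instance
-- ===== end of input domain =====

-- B replaces A's per-number trial-division primality test and per-start binary search over the
-- prefix sums by a Sieve of Eratosthenes plus one membership pass over the prefix sums (objective: faster).

-- ===== PORT A =====
-- int(n ** 0.5) is ported as Nat.sqrt: exact for 0 ≤ n ≤ 2^31 (the double value of n ** 0.5 lies
-- far closer to √n than to any other integer boundary); calc only calls isPrime on n ≥ 2.
def isPrime_py (n : Int) : Bool :=
  if n == 2 || n == 3 then true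
  else
    -- 'for i in range(2, int(n**0.5)+1): if n % i == 0: return False' / 'return True'
    (PySem.List.pyRange 2 ((n.toNat.sqrt : Int) + 1)).all (fun i => !(PySem.Int.mod n i == 0))

-- the 'while lt <= rt' binary-search loop of A's second pass
def binSearch (n : Int) (ps : List Int) (idx lt rt : Int) : Bool :=
  if h : lt ≤ rt then
    let mid := PySem.Int.floordiv (lt + rt) 2
    let v := PySem.List.pyGetD ps mid 0 - PySem.List.pyGetD ps idx 0
    if v == n then true
    else if v < n then binSearch n ps idx (mid + 1) rt
    else binSearch n ps idx lt (mid - 1)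
  else false
  termination_by (rt + 1 - lt).toNat
  decreasing_by
  · have := PySem.Int.floordiv_two_mid_bounds h; omega
  · have := PySem.Int.floordiv_two_mid_bounds h; omega

def calc_py (n : Int) : Int :=
  if 1 < n ∧ n < 4 then 1
  else if n ≤ 1 then 0
  else
    let lst := (PySem.List.pyRange 2 (n + 1)).foldl
      (fun acc i => if isPrime_py i then acc ++ [i] else acc) []
    let leng : Int := lst.length
    -- 'prefix_sum = [0]*leng; prefix_sum[0] = lst[0]' — lst is nonempty here (2 is prime),
    -- so every indexing below is in range and pyGetD/pySetD coincide with Python's indexing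
    let ps0 := PySem.List.pySetD (List.replicate leng.toNat (0 : Int)) 0 (PySem.List.pyGetD lst 0 0)
    let st := (PySem.List.pyRange 1 leng).foldl
      (fun (st : List Int × Int) idx =>
        let v := PySem.List.pyGetD st.1 (idx - 1) 0 + PySem.List.pyGetD lst idx 0
        (PySem.List.pySetD st.1 idx v, if v == n then st.2 + 1 else st.2))
      (ps0, 0)
    (PySem.List.pyRange 0 leng).foldl
      (fun ans idx => if binSearch n st.1 idx idx (leng - 1) then ans + 1 else ans) st.2

-- ===== PORT B =====
-- 'if i not in comps: for j in range(i*i, n+1, i): comps.add(j)'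
def sieveStep (n : Int) (c : PySem.Set Int) (i : Int) : PySem.Set Int :=
  if !(PySem.Set.contains c i) then
    (PySem.List.pyRange (i * i) (n + 1) i).foldl (fun c j => PySem.Set.add c j) c
  else c

-- B's outer sieve loop 'for i in range(2, n+1)', with the upper bound generalised for induction
def sieveUpTo (n b : Int) : PySem.Set Int :=
  (PySem.List.pyRange 2 b).foldl (sieveStep n) PySem.Set.empty

def calc_py_alt (n : Int) : Int :=
  if n ≤ 1 then 0
  else
    let comps := sieveUpTo n (n + 1)
    -- 'prefix = [0]; s = 0; for i in range(2, n+1): if i not in comps: s += i; prefix.append(s)'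
    let pr := (PySem.List.pyRange 2 (n + 1)).foldl
      (fun (st : Int × List Int) i =>
        if !(PySem.Set.contains comps i) then (st.1 + i, st.2 ++ [st.1 + i]) else st)
      (0, [(0 : Int)])
    let ps := PySem.Set.ofList pr.2
    -- 'sum(1 for p in prefix if p + n in ps)'
    pr.2.foldl (fun c p => if PySem.Set.contains ps (p + n) then c + 1 else c) 0

-- ===== PRECONDITION & SPEC =====
def Spec_calc_py (n : Int) (out : Int) : Prop := out = calc_py_alt n
instance (n : Int) (out : Int) : Decidable (Spec_calc_py n out) := by unfold Spec_calc_py; infer_instance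

-- ===== CLAIM (what is proved, stated in full; the proofs are below) =====
def Claim_equal_calc_py : Prop := ∀ (n : Int), Dom_calc_py n → Spec_calc_py n (calc_py n)

-- ===== LEMMAS AND PROOFS =====

-- total form of Python's in-range list assignment
theorem pySetD_eq_set (xs : List Int) (i : Int) (v : Int) (h0 : 0 ≤ i)
    (h1 : i < (xs.length : Int)) : PySem.List.pySetD xs i v = xs.set i.toNat v := by
  have h : PySem.List.pySet? xs i v = some (xs.set i.toNat v) := by
    have h2 := PySem.List.pySet?_natCast xs i.toNat v (by omega)
    rwa [Int.toNat_of_nonneg h0] at h2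
  calc PySem.List.pySetD xs i v = (PySem.List.pySet? xs i v).getD xs := rfl
    _ = xs.set i.toNat v := by rw [h, Option.getD_some]

-- prefix sums of a list starting from running total s (the values A writes into prefix_sum
-- and B appends to prefix)
def presum (s : Int) : List Int → List Int
  | [] => []
  | x :: xs => (s + x) :: presum (s + x) xs

theorem presum_length (s : Int) (xs : List Int) : (presum s xs).length = xs.length := by
  induction xs generalizing s with
  | nil => rfl
  | cons x xs ih => simp [presum, ih]

theorem presum_getElem (s : Int) (xs : List Int) (k : Nat) (hk : k < (presum s xs).length) :
    (presum s xs)[k] = s + (xs.take (k + 1)).sum := by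
  induction xs generalizing s k with
  | nil => simp [presum] at hk
  | cons x xs ih =>
    cases k with
    | zero => simp [presum]
    | succ k =>
      have hk' : k < (presum (s + x) xs).length := by
        rw [presum_length]
        have h2 := hk
        simp only [presum, List.length_cons, presum_length] at h2
        omega
      simp only [presum, List.getElem_cons_succ, List.take_succ_cons, List.sum_cons]
      rw [ih (s + x) k hk']
      ring

theorem sum_take_lt (xs : List Int) (hpos : ∀ x ∈ xs, 0 < x) (a b : Nat)
    (hab : a < b) (hb : b ≤ xs.length) : (xs.take a).sum < (xs.take b).sum := by
  induction b with
  | zero => omega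
  | succ b ih =>
    have hb' : b < xs.length := by omega
    rw [List.sum_take_succ xs b hb']
    have hx : 0 < xs[b] := hpos _ (List.getElem_mem hb')
    rcases Nat.lt_or_ge a b with h | h
    · have := ih h (by omega); omega
    · have : a = b := by omega
      subst this; omega

theorem presum_strict (s : Int) (xs : List Int) (hpos : ∀ x ∈ xs, 0 < x)
    (j k : Nat) (hj : j < (presum s xs).length) (hk : k < (presum s xs).length) (hjk : j < k) :
    (presum s xs)[j] < (presum s xs)[k] := by
  rw [presum_getElem, presum_getElem]
  have := sum_take_lt xs hpos (j + 1) (k + 1) (by omega)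
    (by rw [presum_length] at hk; omega)
  omega

theorem presum_mem_ge (s : Int) (xs : List Int) (hge : ∀ x ∈ xs, 2 ≤ x) :
    ∀ y ∈ presum s xs, s + 2 ≤ y := by
  induction xs generalizing s with
  | nil => simp [presum]
  | cons x xs ih =>
    intro y hy
    simp only [presum, List.mem_cons] at hy
    rcases hy with rfl | hy
    · have := hge x (by simp); omega
    · have := ih (s + x) (fun z hz => hge z (by simp [hz])) y hy
      have := hge x (by simp)
      omega

theorem presum_nodup (s : Int) (xs : List Int) (hpos : ∀ x ∈ xs, 0 < x) :
    (presum s xs).Nodup := by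
  have hp : (presum s xs).Pairwise (· < ·) := by
    rw [List.pairwise_iff_getElem]
    intro i j hi hj hij
    exact presum_strict s xs hpos i j hi hj hij
  exact hp.nodup

-- B's prefix-building loop, characterised
theorem presum_fold (p : Int → Bool) (xs : List Int) (s : Int) (acc : List Int) :
    (xs.foldl (fun (st : Int × List Int) i =>
        if p i then (st.1 + i, st.2 ++ [st.1 + i]) else st) (s, acc))
      = (s + (xs.filter p).sum, acc ++ presum s (xs.filter p)) := by
  induction xs generalizing s acc with
  | nil => simp [presum]
  | cons x xs ih =>
    by_cases hx : p x
    · simp only [List.foldl_cons, hx, if_pos, List.filter_cons_of_pos hx, presum, ih]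
      simp [add_assoc]
    · simp [hx, List.filter_cons_of_neg hx, ih]

-- square bound: 2 ≤ p and p*p ≤ b force p < b
theorem sq_lt_self (p b : Int) (h2 : 2 ≤ p) (hsq : p * p ≤ b) : p < b := by
  nlinarith

-- ---------- sieve correctness ----------

theorem sieve_mem (n : Int) (b : Int) (hb : 2 ≤ b) : b ≤ n + 1 →
    ∀ m, m ∈ sieveUpTo n b ↔
      ∃ p : ℕ, p.Prime ∧ (p : Int) < b ∧ (p : Int) ∣ m ∧ (p : Int) * p ≤ m ∧ m ≤ n := by
  induction b, hb using Int.le_induction with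
  | base =>
    intro _ m
    simp only [sieveUpTo, PySem.List.pyRange_one_eq_nil (le_refl (2 : Int)), List.foldl_nil]
    constructor
    · intro h; exact absurd h (List.not_mem_nil)
    · rintro ⟨p, hp, hlt, -⟩
      exact absurd hlt (by have := hp.two_le; omega)
  | succ b hb ih =>
    intro hbn m
    have hbn' : b ≤ n + 1 := by omega
    have hstep : sieveUpTo n (b + 1) = sieveStep n (sieveUpTo n b) b := by
      unfold sieveUpTo
      rw [PySem.List.pyRange_one_succ_right (by omega : (2 : Int) ≤ b), List.foldl_append]
      rfl
    rw [hstep]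
    by_cases hmem : b ∈ sieveUpTo n b
    · have hcont : PySem.Set.contains (sieveUpTo n b) b = true :=
        (PySem.Set.contains_iff _ _).2 hmem
      simp only [sieveStep, hcont, Bool.not_true, Bool.false_eq_true, if_false]
      rw [ih hbn' m]
      constructor
      · rintro ⟨p, hp, hlt, hdvd, hsq, hmn⟩
        exact ⟨p, hp, by omega, hdvd, hsq, hmn⟩
      · rintro ⟨p, hp, hlt, hdvd, hsq, hmn⟩
        refine ⟨p, hp, ?_, hdvd, hsq, hmn⟩
        by_contra hcon
        have hpb : (p : Int) = b := by omega
        obtain ⟨q, hq, hqlt, hqdvd, hqsq, -⟩ := (ih hbn' b).1 hmem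
        have hbprime : b.toNat.Prime := by
          have : b.toNat = p := by omega
          rw [this]; exact hp
        have hqdvd' : q ∣ b.toNat := by
          have h := hqdvd
          rw [show b = ((b.toNat : Nat) : Int) by omega] at h
          exact_mod_cast h
        rcases hbprime.eq_one_or_self_of_dvd q hqdvd' with h1 | h1
        · exact hq.one_lt.ne' h1
        · have hq2 : (2 : Int) ≤ (q : Int) := by exact_mod_cast hq.two_le
          have : (q : Int) < b := sq_lt_self _ _ hq2 hqsq
          omega
    · have hcont : PySem.Set.contains (sieveUpTo n b) b = false := by
        rw [Bool.eq_false_iff]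
        intro h; exact hmem ((PySem.Set.contains_iff _ _).1 h)
      have hbprime : b.toNat.Prime := by
        by_contra hnp
        apply hmem
        have h0 : 0 < b.toNat := by omega
        have hsq := Nat.minFac_sq_le_self h0 hnp
        have hd := Nat.minFac_dvd b.toNat
        have hpfac : b.toNat.minFac.Prime := Nat.minFac_prime (by omega : b.toNat ≠ 1)
        have hcast : ((b.toNat : Nat) : Int) = b := by omega
        have hsqN : b.toNat.minFac * b.toNat.minFac ≤ b.toNat := by nlinarith [hsq]
        have hsq' : (b.toNat.minFac : Int) * (b.toNat.minFac : Int) ≤ b := by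
          calc (b.toNat.minFac : Int) * (b.toNat.minFac : Int)
              = ((b.toNat.minFac * b.toNat.minFac : Nat) : Int) := by push_cast; ring
            _ ≤ ((b.toNat : Nat) : Int) := by exact_mod_cast hsqN
            _ = b := hcast
        have hdvd' : (b.toNat.minFac : Int) ∣ b := by
          have hh : (b.toNat.minFac : Int) ∣ ((b.toNat : Nat) : Int) := Int.natCast_dvd_natCast.2 hd
          rwa [hcast] at hh
        have h2 : (2 : Int) ≤ (b.toNat.minFac : Int) := by exact_mod_cast hpfac.two_le
        exact (ih hbn' b).2 ⟨b.toNat.minFac, hpfac, sq_lt_self _ _ h2 hsq', hdvd', hsq', by omega⟩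
      simp only [sieveStep, hcont, Bool.not_false, if_true]
      rw [PySem.Set.mem_foldl_add (f := fun j => j)]
      rw [ih hbn' m]
      have hb0 : (0 : Int) < b := by omega
      constructor
      · rintro (⟨p, hp, hlt, hdvd, hsq, hmn⟩ | ⟨j, hj, rfl⟩)
        · exact ⟨p, hp, by omega, hdvd, hsq, hmn⟩
        · obtain ⟨h1, h2, h3⟩ := (PySem.List.mem_pyRange_iff_of_pos hb0 m).1 hj
          have hcast : ((b.toNat : Nat) : Int) = b := by omega
          refine ⟨b.toNat, hbprime, by omega, ?_, by rw [hcast]; nlinarith, by omega⟩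
          rw [hcast]
          have hbb : b ∣ b * b := Dvd.intro b rfl
          have := dvd_add h3 hbb
          simpa using this
      · rintro ⟨p, hp, hlt, hdvd, hsq, hmn⟩
        by_cases hp_lt : (p : Int) < b
        · exact Or.inl ⟨p, hp, hp_lt, hdvd, hsq, hmn⟩
        · have hpb : (p : Int) = b := by omega
          right
          refine ⟨m, ?_, rfl⟩
          rw [PySem.List.mem_pyRange_iff_of_pos hb0]
          rw [hpb] at hdvd hsq
          exact ⟨hsq, by omega, dvd_sub hdvd (Dvd.intro b rfl)⟩
  
theorem sieve_final (n m : Int) (h2 : 2 ≤ m) (hmn : m ≤ n) :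
    (PySem.Set.contains (sieveUpTo n (n + 1)) m = false) ↔ m.toNat.Prime := by
  have hmem := sieve_mem n (n + 1) (by omega) (le_refl _) m
  rw [Bool.eq_false_iff, Ne, PySem.Set.contains_iff, hmem]
  have hcast : ((m.toNat : Nat) : Int) = m := by omega
  constructor
  · intro hno
    by_contra hnp
    apply hno
    have h0 : 0 < m.toNat := by omega
    have hsq := Nat.minFac_sq_le_self h0 hnp
    have hd := Nat.minFac_dvd m.toNat
    have hpfac : m.toNat.minFac.Prime := Nat.minFac_prime (by omega : m.toNat ≠ 1)
    have hdle : (m.toNat.minFac : Int) ≤ m := by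
      have : m.toNat.minFac ≤ m.toNat := Nat.minFac_le h0
      omega
    have hsqN : m.toNat.minFac * m.toNat.minFac ≤ m.toNat := by nlinarith [hsq]
    have hsq' : (m.toNat.minFac : Int) * (m.toNat.minFac : Int) ≤ m := by
      calc (m.toNat.minFac : Int) * (m.toNat.minFac : Int)
          = ((m.toNat.minFac * m.toNat.minFac : Nat) : Int) := by push_cast; ring
        _ ≤ ((m.toNat : Nat) : Int) := by exact_mod_cast hsqN
        _ = m := hcast
    have hdvd' : (m.toNat.minFac : Int) ∣ m := by
      have hh : (m.toNat.minFac : Int) ∣ ((m.toNat : Nat) : Int) := Int.natCast_dvd_natCast.2 hd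
      rwa [hcast] at hh
    exact ⟨m.toNat.minFac, hpfac, by omega, hdvd', hsq', hmn⟩
  · rintro hp ⟨p, hpp, hlt, hdvd, hsq, -⟩
    have hdvd' : p ∣ m.toNat := by
      have hh : (p : Int) ∣ ((m.toNat : Nat) : Int) := by rwa [hcast]
      exact_mod_cast hh
    rcases hp.eq_one_or_self_of_dvd p hdvd' with h1 | h1
    · exact hpp.one_lt.ne' h1
    · have hp2 : (2 : Int) ≤ (p : Int) := by exact_mod_cast hpp.two_le
      have : (p : Int) < m := sq_lt_self _ _ hp2 hsq
      omega

-- ---------- trial-division correctness ----------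

theorem isPrime_correct (i : Int) (h2 : 2 ≤ i) : isPrime_py i = true ↔ i.toNat.Prime := by
  unfold isPrime_py
  by_cases h23 : i = 2 ∨ i = 3
  · rcases h23 with rfl | rfl <;> simp <;> decide
  · have hcond : (i == 2 || i == 3) = false := by
      simp only [Bool.or_eq_false_iff, beq_eq_false_iff_ne, ne_eq]
      omega
    simp only [hcond, Bool.false_eq_true, if_false, List.all_eq_true]
    have hcast : ((i.toNat : Nat) : Int) = i := by omega
    constructor
    · intro hall
      rw [Nat.prime_def_le_sqrt]
      refine ⟨by omega, fun d hd2 hdsqrt hdvd => ?_⟩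
      have hdr : ((d : Nat) : Int) ∈ PySem.List.pyRange 2 ((i.toNat.sqrt : Int) + 1) :=
        PySem.List.mem_pyRange_one.2 ⟨by exact_mod_cast hd2, by omega⟩
      have h := hall _ hdr
      simp only [Bool.not_eq_eq_eq_not, Bool.not_true, beq_eq_false_iff_ne, ne_eq,
        PySem.Int.mod_eq_zero_iff_dvd] at h
      apply h
      have hh : ((d : Nat) : Int) ∣ ((i.toNat : Nat) : Int) := Int.natCast_dvd_natCast.2 hdvd
      rwa [hcast] at hh
    · intro hp d hd
      obtain ⟨hd2, hdlt⟩ := PySem.List.mem_pyRange_one.1 hd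
      simp only [Bool.not_eq_eq_eq_not, Bool.not_true, beq_eq_false_iff_ne, ne_eq,
        PySem.Int.mod_eq_zero_iff_dvd]
      intro hdvd
      have hres := (Nat.prime_def_le_sqrt.1 hp).2 d.toNat (by omega) (by omega)
      apply hres
      have hd0 : ((d.toNat : Nat) : Int) = d := by omega
      have hh : ((d.toNat : Nat) : Int) ∣ ((i.toNat : Nat) : Int) := by rw [hd0, hcast]; exact hdvd
      exact_mod_cast hh

-- the two prime filters agree on [2, n]
theorem filter_eq (n : Int) (_hn : 2 ≤ n) :
    ((PySem.List.pyRange 2 (n + 1)).filter (fun i => !(PySem.Set.contains (sieveUpTo n (n + 1)) i)))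
      = (PySem.List.pyRange 2 (n + 1)).filter (fun i => isPrime_py i) := by
  apply List.filter_congr
  intro i hi
  obtain ⟨h2, hlt⟩ := PySem.List.mem_pyRange_one.1 hi
  have h1 := sieve_final n i h2 (by omega)
  have h2' := isPrime_correct i h2
  rw [Bool.eq_iff_iff, Bool.not_eq_true', h1, h2']

-- ---------- A's binary search ----------

theorem binSearch_spec (n : Int) (P : List Int)
    (hmono : ∀ (j k : Nat) (hj : j < P.length) (hk : k < P.length), j < k → P[j] < P[k])
    (idx : Int) (lt rt : Int) (hlt : 0 ≤ lt) (hrt : rt < (P.length : Int)) :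
    binSearch n P idx lt rt = true ↔
      ∃ j : Nat, lt ≤ (j : Int) ∧ (j : Int) ≤ rt ∧
        P.getD j 0 = PySem.List.pyGetD P idx 0 + n := by
  have main : ∀ fuel (lt rt : Int), (rt + 1 - lt).toNat ≤ fuel → 0 ≤ lt →
      rt < (P.length : Int) →
      (binSearch n P idx lt rt = true ↔
        ∃ j : Nat, lt ≤ (j : Int) ∧ (j : Int) ≤ rt ∧
          P.getD j 0 = PySem.List.pyGetD P idx 0 + n) := by
    intro fuel
    induction fuel with
    | zero =>
      intro lt rt hf hlt hrt
      rw [binSearch, dif_neg (by omega : ¬ lt ≤ rt)]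
      constructor
      · intro h; exact absurd h (by simp)
      · rintro ⟨j, h1, h2, -⟩; omega
    | succ fuel ih =>
      intro lt rt hf hlt hrt
      rw [binSearch]
      by_cases h : lt ≤ rt
      · rw [dif_pos h]
        have hmid := PySem.Int.floordiv_two_mid_bounds h
        set mid := PySem.Int.floordiv (lt + rt) 2 with hmiddef
        have h0m : 0 ≤ mid := by omega
        have hmlen : mid < (P.length : Int) := by omega
        have hgm : PySem.List.pyGetD P mid 0 = P[mid.toNat]'(by omega) :=
          PySem.List.pyGetD_eq_getElem P 0 h0m hmlen
        by_cases he : PySem.List.pyGetD P mid 0 - PySem.List.pyGetD P idx 0 = n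
        · simp only [he, beq_self_eq_true, if_true, true_iff]
          refine ⟨mid.toNat, by omega, by omega, ?_⟩
          rw [List.getD_eq_getElem P 0 (by omega), ← hgm]
          omega
        · have hbeq : ((PySem.List.pyGetD P mid 0 - PySem.List.pyGetD P idx 0) == n) = false := by
            simp [he]
          rw [if_neg (by simp [he])]
          by_cases hl : PySem.List.pyGetD P mid 0 - PySem.List.pyGetD P idx 0 < n
          · rw [if_pos hl, ih (mid + 1) rt (by omega) (by omega) hrt]
            constructor
            · rintro ⟨j, h1, h2, h3⟩; exact ⟨j, by omega, h2, h3⟩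
            · rintro ⟨j, h1, h2, h3⟩
              refine ⟨j, ?_, h2, h3⟩
              by_contra hcon
              have hjm : j ≤ mid.toNat := by omega
              have hjlen : j < P.length := by omega
              have hle : P[j] ≤ P[mid.toNat]'(by omega) := by
                rcases Nat.lt_or_ge j mid.toNat with hlt' | hge
                · exact le_of_lt (hmono j mid.toNat hjlen (by omega) hlt')
                · have : j = mid.toNat := by omega
                  subst this; exact le_refl _
              rw [List.getD_eq_getElem P 0 hjlen] at h3
              rw [hgm] at hl
              omega
          · rw [if_neg hl, ih lt (mid - 1) (by omega) hlt (by omega)]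
            have hg : n < PySem.List.pyGetD P mid 0 - PySem.List.pyGetD P idx 0 := by omega
            constructor
            · rintro ⟨j, h1, h2, h3⟩; exact ⟨j, h1, by omega, h3⟩
            · rintro ⟨j, h1, h2, h3⟩
              refine ⟨j, h1, ?_, h3⟩
              by_contra hcon
              have hjm : mid.toNat ≤ j := by omega
              have hjlen : j < P.length := by omega
              have hle : P[mid.toNat]'(by omega) ≤ P[j] := by
                rcases Nat.lt_or_ge mid.toNat j with hlt' | hge
                · exact le_of_lt (hmono mid.toNat j (by omega) hjlen hlt')
                · have : mid.toNat = j := by omega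
                  subst this; exact le_refl _
              rw [List.getD_eq_getElem P 0 hjlen] at h3
              rw [hgm] at hg
              omega
      · rw [dif_neg h]
        constructor
        · intro hh; exact absurd hh (by simp)
        · rintro ⟨j, h1, h2, -⟩; omega
  exact main (rt + 1 - lt).toNat lt rt (le_refl _) hlt hrt

theorem binSearch_mem (n : Int) (hn : 0 < n) (P : List Int)
    (hmono : ∀ (j k : Nat) (hj : j < P.length) (hk : k < P.length), j < k → P[j] < P[k])
    (idx : Int) (h0 : 0 ≤ idx) (hidx : idx < (P.length : Int)) :
    (binSearch n P idx idx ((P.length : Int) - 1) = true) ↔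
      (PySem.List.pyGetD P idx 0 + n) ∈ P := by
  rw [binSearch_spec n P hmono idx idx ((P.length : Int) - 1) h0 (by omega)]
  constructor
  · rintro ⟨j, h1, h2, hv⟩
    rw [List.getD_eq_getElem P 0 (by omega)] at hv
    rw [← hv]
    exact List.getElem_mem _
  · intro hm
    obtain ⟨j, hj, hjv⟩ := List.mem_iff_getElem.1 hm
    refine ⟨j, ?_, by omega, by rw [List.getD_eq_getElem P 0 hj]; exact hjv⟩
    have hc : PySem.List.pyGetD P idx 0 = P[idx.toNat]'(by omega) :=
      PySem.List.pyGetD_eq_getElem P 0 h0 hidx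
    by_contra hcon
    have hlt : j < idx.toNat := by omega
    have := hmono j idx.toNat hj (by omega) hlt
    rw [hc] at hjv
    omega

-- ---------- A's first loop ----------

-- value of (prefix written so far) ++ (zeros) at an index
theorem mix_getD (P : List Int) (K len i : Nat) (hK : K ≤ P.length) :
    (P.take K ++ List.replicate (len - K) (0 : Int)).getD i 0
      = if i < K then P.getD i 0 else 0 := by
  rcases Nat.lt_or_ge i K with h | h
  · rw [if_pos h]
    rw [List.getD_append _ _ _ _ (by simp; omega)]
    have h' : i < P.length := by omega
    rw [List.getD_eq_getElem _ _ (by simp; omega), List.getD_eq_getElem _ _ h']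
    exact List.getElem_take
  · rw [if_neg (by omega)]
    have hlen : (P.take K).length = K := by simp; omega
    rcases Nat.lt_or_ge i (K + (len - K)) with h2 | h2
    · rw [List.getD_eq_getElem _ _ (by simp; omega)]
      rw [List.getElem_append_right (by omega)]
      simp
    · rw [List.getD_eq_default _ _ (by simp; omega)]

theorem loop1_aux (n : Int) (lst : List Int) (hne : lst ≠ []) (m : Int) (h1 : 1 ≤ m) :
    m ≤ (lst.length : Int) →
    ((PySem.List.pyRange 1 m).foldl
      (fun (st : List Int × Int) idx =>
        (PySem.List.pySetD st.1 idx
            (PySem.List.pyGetD st.1 (idx - 1) 0 + PySem.List.pyGetD lst idx 0),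
          if (PySem.List.pyGetD st.1 (idx - 1) 0 + PySem.List.pyGetD lst idx 0) == n
          then st.2 + 1 else st.2))
      (PySem.List.pySetD (List.replicate lst.length (0 : Int)) 0 (PySem.List.pyGetD lst 0 0), 0))
      = ((presum 0 lst).take m.toNat ++ List.replicate (lst.length - m.toNat) 0,
         (((PySem.List.pyRange 1 m).countP
            (fun idx => PySem.List.pyGetD (presum 0 lst) idx 0 == n) : Nat) : Int)) := by
  induction m, h1 using Int.le_induction with
  | base =>
    intro hm
    obtain ⟨x, t, rfl⟩ := List.exists_cons_of_ne_nil hne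
    rw [PySem.List.pyRange_one_eq_nil (le_refl (1 : Int))]
    have hg : PySem.List.pyGetD (x :: t) 0 0 = x := by
      rw [PySem.List.pyGetD_eq_getElem (x :: t) 0 (by omega) (by simp)]
      rfl
    have hs : PySem.List.pySetD (List.replicate (x :: t).length (0 : Int)) 0 x
        = x :: List.replicate t.length 0 := by
      rw [pySetD_eq_set _ _ _ (le_refl 0) (by simp)]
      simp [List.replicate_succ]
    simp only [List.foldl_nil, List.countP_nil, hg, hs]
    simp [presum]
  | succ m hm ih =>
    intro hm1
    have hmlen : m < (lst.length : Int) := by omega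
    have hPlen : (presum 0 lst).length = lst.length := presum_length 0 lst
    have hKlen : m.toNat < lst.length := by omega
    have hK1 : 1 ≤ m.toNat := by omega
    have hm1t : (m + 1).toNat = m.toNat + 1 := by omega
    have hgetD : ∀ (L : List Int) (i : Nat) (h : i < L.length), L[i]'h = L.getD i 0 :=
      fun L i h => (List.getD_eq_getElem L 0 h).symm
    have hlen1 : (((presum 0 lst).take m.toNat
        ++ List.replicate (lst.length - m.toNat) (0 : Int)).length) = lst.length := by
      simp [hPlen]; omega
    have hg1 : PySem.List.pyGetD ((presum 0 lst).take m.toNat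
        ++ List.replicate (lst.length - m.toNat) (0 : Int)) (m - 1) 0
        = (presum 0 lst).getD (m.toNat - 1) 0 := by
      rw [PySem.List.pyGetD_eq_getElem _ 0 (by omega) (by rw [hlen1]; omega)]
      rw [hgetD _ _ _, mix_getD _ _ _ _ (by omega)]
      rw [if_pos (by omega)]
      congr 1
      omega
    have hg2 : PySem.List.pyGetD lst m 0 = lst.getD m.toNat 0 := by
      rw [PySem.List.pyGetD_eq_getElem lst 0 (by omega) (by omega), hgetD]
    have hv : (presum 0 lst).getD (m.toNat - 1) 0 + lst.getD m.toNat 0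
        = (presum 0 lst).getD m.toNat 0 := by
      have e1 := presum_getElem 0 lst (m.toNat - 1) (by rw [presum_length]; omega)
      have e2 := presum_getElem 0 lst m.toNat (by rw [presum_length]; omega)
      have e3 := List.sum_take_succ lst (m.toNat - 1) (by omega)
      have e4 : lst.getD m.toNat 0 = lst[m.toNat]'hKlen := List.getD_eq_getElem lst 0 hKlen
      rw [hgetD _ _ (by rw [presum_length]; omega)] at e1
      rw [hgetD _ _ (by rw [presum_length]; omega)] at e2
      have eS := List.sum_take_succ lst m.toNat hKlen
      have hKK : m.toNat - 1 + 1 = m.toNat := by omega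
      rw [hKK] at e1
      omega
    have hset : PySem.List.pySetD ((presum 0 lst).take m.toNat
          ++ List.replicate (lst.length - m.toNat) (0 : Int)) m
          ((presum 0 lst).getD (m.toNat - 1) 0 + lst.getD m.toNat 0)
        = (presum 0 lst).take (m + 1).toNat
          ++ List.replicate (lst.length - (m + 1).toNat) 0 := by
      rw [hv, pySetD_eq_set _ _ _ (by omega) (by rw [hlen1]; omega)]
      rw [hm1t]
      apply List.ext_getElem
      · simp [hPlen]; omega
      · intro i hi hi'
        rw [List.getElem_set]
        simp only [hgetD]
        rw [mix_getD _ _ _ _ (by omega), mix_getD _ _ _ _ (by omega)]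
        by_cases hc : m.toNat = i
        · rw [if_pos hc, if_pos (by omega), hc]
        · rw [if_neg hc]
          split_ifs <;> first | rfl | omega
    have hgP : PySem.List.pyGetD (presum 0 lst) m 0 = (presum 0 lst).getD m.toNat 0 := by
      rw [PySem.List.pyGetD_eq_getElem (presum 0 lst) 0 (by omega)
        (by rw [hPlen]; omega), hgetD]
    rw [PySem.List.pyRange_one_succ_right (by omega : (1 : Int) ≤ m), List.foldl_append,
      ih (by omega)]
    simp only [List.foldl_cons, List.foldl_nil, hg1, hg2]
    rw [hset, Prod.mk.injEq]
    refine ⟨rfl, ?_⟩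
    rw [List.countP_append]
    simp only [List.countP_cons, List.countP_nil, Nat.zero_add, hgP]
    rw [hv]
    by_cases hbn : (((presum 0 lst).getD m.toNat 0 == n) = true)
    · rw [if_pos hbn, if_pos hbn]; push_cast; ring
    · rw [if_neg hbn, if_neg hbn]; push_cast; ring

theorem loop1_spec (n : Int) (lst : List Int) (hne : lst ≠ []) :
    ((PySem.List.pyRange 1 (lst.length : Int)).foldl
      (fun (st : List Int × Int) idx =>
        (PySem.List.pySetD st.1 idx
            (PySem.List.pyGetD st.1 (idx - 1) 0 + PySem.List.pyGetD lst idx 0),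
          if (PySem.List.pyGetD st.1 (idx - 1) 0 + PySem.List.pyGetD lst idx 0) == n
          then st.2 + 1 else st.2))
      (PySem.List.pySetD (List.replicate lst.length (0 : Int)) 0 (PySem.List.pyGetD lst 0 0), 0))
      = (presum 0 lst,
         ((((presum 0 lst).drop 1).countP (fun v => v == n) : Nat) : Int)) := by
  have h := loop1_aux n lst hne (lst.length : Int) (by
    have : lst.length ≠ 0 := by simpa using hne
    omega) (le_refl _)
  rw [h]
  congr 1
  · rw [Int.toNat_natCast]
    rw [List.take_of_length_le (by rw [presum_length])]
    simp
  · congr 1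
    have hmap := PySem.List.map_pyGetD_pyRange' (presum 0 lst) 0 (a := 1) (by omega)
    rw [presum_length] at hmap
    calc (PySem.List.pyRange 1 (lst.length : Int)).countP
          (fun idx => PySem.List.pyGetD (presum 0 lst) idx 0 == n)
        = ((PySem.List.pyRange 1 (lst.length : Int)).map
            (fun j => PySem.List.pyGetD (presum 0 lst) j 0)).countP (fun v => v == n) := by
          rw [List.countP_map]; rfl
      _ = ((presum 0 lst).drop 1).countP (fun v => v == n) := by
          rw [hmap]; rfl

-- ---------- main equality for n ≥ 4 ----------

theorem calc_eq_of_ge4 (n : Int) (h4 : 4 ≤ n) : calc_py n = calc_py_alt n := by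
  have h2n : (2 : Int) ≤ n := by omega
  have hfe := filter_eq n h2n
  have hcons : (PySem.List.pyRange 2 (n + 1)).filter (fun i => isPrime_py i)
      = 2 :: (PySem.List.pyRange (2 + 1) (n + 1)).filter (fun i => isPrime_py i) := by
    rw [PySem.List.pyRange_one_cons (by omega : (2 : Int) < n + 1)]
    rw [List.filter_cons_of_pos (by decide)]
  generalize hL : (PySem.List.pyRange 2 (n + 1)).filter (fun i => isPrime_py i) = lst
      at hcons hfe
  obtain ⟨t, ht⟩ : ∃ t, lst = 2 :: t := ⟨_, hcons⟩
  have hne : lst ≠ [] := by rw [ht]; simp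
  have hmem : ∀ x ∈ lst, 2 ≤ x := by
    intro x hx
    rw [← hL] at hx
    exact ((PySem.List.mem_pyRange_one).1 (List.mem_of_mem_filter hx)).1
  have hPlen : (presum 0 lst).length = lst.length := presum_length 0 lst
  have hpos : ∀ x ∈ lst, 0 < x := fun x hx => by have := hmem x hx; omega
  have hmono := presum_strict 0 lst hpos
  have hnd : (presum 0 lst).Nodup := presum_nodup 0 lst hpos
  have hPge : ∀ p ∈ presum 0 lst, 2 ≤ p := by
    intro p hp; have := presum_mem_ge 0 lst hmem p hp; omega
  -- A reduced to its two counts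
  have hA : calc_py n
      = ((((presum 0 lst).drop 1).countP (fun v => v == n) : Nat) : Int)
        + (((PySem.List.pyRange 0 (lst.length : Int)).countP
            (fun idx => binSearch n (presum 0 lst) idx idx ((lst.length : Int) - 1)) : Nat) : Int) := by
    unfold calc_py
    rw [if_neg (by omega), if_neg (by omega)]
    simp only [PySem.List.foldl_append_if, List.map_id', List.nil_append, hL,
      Int.toNat_natCast, loop1_spec n lst hne, PySem.List.foldl_count_if]
  -- B reduced to its count
  have hB : calc_py_alt n
      = 0 + ((((0 :: presum 0 lst).countP
          (fun p => PySem.Set.contains (PySem.Set.ofList (0 :: presum 0 lst)) (p + n))) : Nat) : Int) := by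
    unfold calc_py_alt
    rw [if_neg (by omega)]
    simp only [presum_fold, hfe, List.singleton_append, PySem.List.foldl_count_if]
  -- B's set-membership count, restated over list membership
  have e2 : ((0 :: presum 0 lst).countP
        (fun p => PySem.Set.contains (PySem.Set.ofList (0 :: presum 0 lst)) (p + n)))
      = (0 :: presum 0 lst).countP (fun p => decide (p + n ∈ (0 : Int) :: presum 0 lst)) := by
    apply List.countP_congr
    intro a _
    rw [Bool.eq_iff_iff, PySem.Set.contains_iff, PySem.Set.mem_ofList, decide_eq_true_iff]
    simp
  have e3 : (0 :: presum 0 lst).countP (fun p => decide (p + n ∈ (0 : Int) :: presum 0 lst))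
      = (if n ∈ presum 0 lst then 1 else 0)
        + (presum 0 lst).countP (fun p => decide (p + n ∈ presum 0 lst)) := by
    rw [List.countP_cons]
    have hq0 : (decide ((0 : Int) + n ∈ (0 : Int) :: presum 0 lst)) = decide (n ∈ presum 0 lst) := by
      simp only [zero_add, List.mem_cons]
      have hn0 : ¬ (n = 0) := by omega
      simp [hn0]
    have hqt : (presum 0 lst).countP (fun p => decide (p + n ∈ (0 : Int) :: presum 0 lst))
        = (presum 0 lst).countP (fun p => decide (p + n ∈ presum 0 lst)) := by
      apply List.countP_congr
      intro a ha
      have h2a := hPge a ha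
      simp only [List.mem_cons]
      have han : ¬ (a + n = 0) := by omega
      simp [han]
    rw [hq0, hqt]
    by_cases hmm : n ∈ presum 0 lst
    · simp [hmm, Nat.add_comm]
    · simp [hmm]
  -- A's first count is a membership test
  have e4 : ((presum 0 lst).drop 1).countP (fun v => v == n)
      = if n ∈ presum 0 lst then 1 else 0 := by
    have hcnt : ((presum 0 lst).drop 1).countP (fun v => v == n)
        = ((presum 0 lst).drop 1).count n := rfl
    have hPc : presum 0 lst = (0 + 2) :: presum (0 + 2) t := by rw [ht]; rfl
    have hndt : ((presum 0 lst).drop 1).Nodup := (List.drop_sublist 1 _).nodup hnd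
    have hmemiff : n ∈ presum 0 lst ↔ n ∈ (presum 0 lst).drop 1 := by
      rw [hPc]
      have hn2 : ¬ n = 0 + 2 := by omega
      simp only [List.drop_succ_cons, List.drop_zero, List.mem_cons]
      constructor
      · rintro (h | h)
        · exact absurd h hn2
        · exact h
      · exact fun h => Or.inr h
    rw [hcnt]
    by_cases hmm : n ∈ presum 0 lst
    · rw [if_pos hmm]
      exact List.count_eq_one_of_mem hndt (hmemiff.1 hmm)
    · rw [if_neg hmm]
      exact List.count_eq_zero_of_not_mem (fun h => hmm (hmemiff.2 h))
  -- A's second count is the per-element membership count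
  have e5 : (PySem.List.pyRange 0 (lst.length : Int)).countP
        (fun idx => binSearch n (presum 0 lst) idx idx ((lst.length : Int) - 1))
      = (presum 0 lst).countP (fun p => decide (p + n ∈ presum 0 lst)) := by
    have hll : (lst.length : Int) = ((presum 0 lst).length : Int) := by rw [hPlen]
    rw [hll]
    have hcongr : (PySem.List.pyRange 0 ((presum 0 lst).length : Int)).countP
          (fun idx => binSearch n (presum 0 lst) idx idx (((presum 0 lst).length : Int) - 1))
        = (PySem.List.pyRange 0 ((presum 0 lst).length : Int)).countP
            (fun idx => decide (PySem.List.pyGetD (presum 0 lst) idx 0 + n ∈ presum 0 lst)) := by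
      apply List.countP_congr
      intro idx hidx
      obtain ⟨h0, hiL⟩ := PySem.List.mem_pyRange_one.1 hidx
      rw [Bool.eq_iff_iff, binSearch_mem n (by omega) (presum 0 lst) hmono idx h0 hiL,
        decide_eq_true_iff]
      simp
    rw [hcongr]
    have hmap := PySem.List.map_pyGetD_pyRange' (presum 0 lst) (0 : Int) (a := (0 : Int)) (le_refl 0)
    calc (PySem.List.pyRange 0 ((presum 0 lst).length : Int)).countP
          (fun idx => decide (PySem.List.pyGetD (presum 0 lst) idx 0 + n ∈ presum 0 lst))
        = ((PySem.List.pyRange 0 ((presum 0 lst).length : Int)).map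
            (fun j => PySem.List.pyGetD (presum 0 lst) j 0)).countP
            (fun p => decide (p + n ∈ presum 0 lst)) := by rw [List.countP_map]; rfl
      _ = (presum 0 lst).countP (fun p => decide (p + n ∈ presum 0 lst)) := by rw [hmap]; simp
  rw [hA, hB, e2, e3, e4, e5]
  split_ifs <;> push_cast <;> ring

-- ===== VERDICT (by name: the statement is the Claim_ definition above) =====
theorem calc_py_spec : Claim_equal_calc_py := by
  unfold Claim_equal_calc_py
  intro n _
  unfold Spec_calc_py
  by_cases h14 : 1 < n ∧ n < 4
  · have hn : n = 2 ∨ n = 3 := by omega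
    rcases hn with rfl | rfl <;> decide
  · by_cases h1 : n ≤ 1
    · simp [calc_py, calc_py_alt, h14, h1]
    · exact calc_eq_of_ge4 n (by omega)
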